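-- pv_equiv track=rewrite | github.com/ddalkyTokky/Algorithm_test | Python3/프로그래머스/3/132266. 부대복귀/부대복귀.py | solution
-- ===== SOURCE A (Python) =====
-- def solution(n, roads, sources, destination):
--     answer = []
--     dict_road = {}
--     for r in roads:
--         if(r[0] in dict_road):
--             dict_road[r[0]].append(r[1])
--         else:
--             dict_road[r[0]] = [r[1]]
--
--         if(r[1] in dict_road):
--             dict_road[r[1]].append(r[0])
--         else:
--             dict_road[r[1]] = [r[0]]
--
--     queue = [destination]
--     visited = {}
--     visited[destination] = 0
--     while(len(queue) != 0):
--         current = queue.pop(0)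
--         if(current not in dict_road):
--             continue
--         for item in dict_road[current]:
--             if(item not in visited):
--                 queue.append(item)
--                 visited[item] = (visited[current] + 1)
--     for s in sources:
--         if(s in visited):
--             answer.append(visited[s])
--         else:
--             answer.append(-1)
--     return answer
-- ===== SOURCE B (Python) =====
-- def solution(n, roads, sources, destination):
--     # Layered edge-list relaxation: no adjacency structure at all.  Each round
--     # sweeps the whole road list once and labels, with the next level, every
--     # still-unlabelled endpoint of a road whose other endpoint is in the
--     # current frontier set.
--     dist = {destination: 0}
--     frontier = {destination}
--     level = 0
--     while frontier:
--         level += 1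
--         nxt = set()
--         for r in roads:
--             a, b = r[0], r[1]
--             if a in frontier and b not in dist:
--                 dist[b] = level
--                 nxt.add(b)
--             if b in frontier and a not in dist:
--                 dist[a] = level
--                 nxt.add(a)
--         frontier = nxt
--     return [dist.get(s, -1) for s in sources]
-- ===== Notes on version B (the rewrite author's own statement) =====
-- stated objective: alternative
-- what changed: Replaces A's adjacency-dict BFS with a single-pop FIFO queue by layered edge-list relaxation: B builds no adjacency structure at all, but repeatedly sweeps the raw road list, labelling with the next level every unlabelled endpoint of a road whose other endpoint is in the current frontier set.
import Mathlib
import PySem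

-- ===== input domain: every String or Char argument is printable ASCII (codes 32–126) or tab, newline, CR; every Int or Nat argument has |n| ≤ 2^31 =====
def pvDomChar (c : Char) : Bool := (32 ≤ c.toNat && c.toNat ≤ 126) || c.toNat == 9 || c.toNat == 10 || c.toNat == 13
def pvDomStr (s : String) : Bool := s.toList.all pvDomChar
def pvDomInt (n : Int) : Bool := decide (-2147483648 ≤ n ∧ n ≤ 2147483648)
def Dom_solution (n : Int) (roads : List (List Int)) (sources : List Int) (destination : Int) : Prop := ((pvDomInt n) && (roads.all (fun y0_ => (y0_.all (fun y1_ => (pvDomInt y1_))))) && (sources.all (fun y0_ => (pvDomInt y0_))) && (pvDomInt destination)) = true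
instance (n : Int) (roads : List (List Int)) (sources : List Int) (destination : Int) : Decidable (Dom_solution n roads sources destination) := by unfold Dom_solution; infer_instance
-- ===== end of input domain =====

-- B replaces A's adjacency-dict single-pop BFS by layered edge-list relaxation: no adjacency
-- structure at all; each round sweeps the whole road list once and labels, with the next level,
-- every unlabelled endpoint of a road whose other endpoint is in the current frontier set.

-- ===== PORT A =====
-- dict_road update for one endpoint: if k in d: d[k].append(x) else: d[k] = [x]
def buildRoadA (d : PySem.Dict Int (List Int)) (k x : Int) : PySem.Dict Int (List Int) :=
  match d.get? k with
  | some l => d.insert k (l ++ [x])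
  | none   => d.insert k [x]

-- the 'for r in roads' loop (r[0]/r[1] raise IndexError on a short road: Pre_ excludes those)
def buildA (roads : List (List Int)) : PySem.Dict Int (List Int) :=
  roads.foldl (fun d r =>
    match PySem.List.pyGet? r 0, PySem.List.pyGet? r 1 with
    | some a, some b => buildRoadA (buildRoadA d a b) b a
    | _, _ => d) PySem.Dict.empty

-- the inner 'for item in dict_road[current]' body
def innerA (c : Int) (st : List Int × PySem.Dict Int Int) (item : Int) :
    List Int × PySem.Dict Int Int :=
  if st.2.contains item then st
  else (st.1 ++ [item], st.2.insert item (st.2.getD c 0 + 1))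

-- the while loop; fuel only guards termination (the initial fuel below always suffices)
def bfsA (adj : PySem.Dict Int (List Int)) :
    Nat → List Int → PySem.Dict Int Int → PySem.Dict Int Int
  | 0, _, V => V
  | _ + 1, [], V => V
  | fuel + 1, c :: q, V =>
    match adj.get? c with
    | none => bfsA adj fuel q V
    | some nbrs =>
      let st := nbrs.foldl (innerA c) (q, V)
      bfsA adj fuel st.1 st.2

def solution (n : Int) (roads : List (List Int)) (sources : List Int) (destination : Int) : List Int :=
  let adj := buildA roads
  let visited := bfsA adj (adj.values.flatten.length + 2) [destination]
      (PySem.Dict.empty.insert destination 0)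
  sources.foldl (fun answer s =>
    match visited.get? s with
    | some v => answer ++ [v]
    | none   => answer ++ [-1]) []

-- ===== PORT B =====
-- one of the two symmetric 'if x in frontier and y not in dist' relaxations of a road
def relaxEdge (frontier : PySem.Set Int) (level : Int) (x y : Int)
    (st : PySem.Dict Int Int × PySem.Set Int) : PySem.Dict Int Int × PySem.Set Int :=
  if PySem.Set.contains frontier x && !st.1.contains y then
    (st.1.insert y level, PySem.Set.add st.2 y)
  else st

-- one road r of the inner 'for r in roads' sweep: a, b = r[0], r[1]; then the two ifs
def stepEdge (frontier : PySem.Set Int) (level : Int)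
    (st : PySem.Dict Int Int × PySem.Set Int) (r : List Int) :
    PySem.Dict Int Int × PySem.Set Int :=
  match PySem.List.pyGet? r 0, PySem.List.pyGet? r 1 with
  | some a, some b => relaxEdge frontier level b a (relaxEdge frontier level a b st)
  | _, _ => st

-- 'while frontier:' — one full sweep of roads per level; fuel only guards termination
def bfsB (roads : List (List Int)) :
    Nat → PySem.Set Int → Int → PySem.Dict Int Int → PySem.Dict Int Int
  | 0, _, _, dist => dist
  | _ + 1, [], _, dist => dist
  | fuel + 1, f :: fs, level, dist =>
    let st := roads.foldl (stepEdge (f :: fs) (level + 1)) (dist, PySem.Set.empty)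
    bfsB roads fuel st.2 (level + 1) st.1

def solution_alt (n : Int) (roads : List (List Int)) (sources : List Int) (destination : Int) : List Int :=
  let dist := bfsB roads (2 * roads.length + 2) [destination] 0
      (PySem.Dict.empty.insert destination 0)
  sources.map (fun s => dist.getD s (-1))

-- ===== PRECONDITION & SPEC =====
-- Pre_ excludes exactly the inputs where the Python A raises IndexError: a road with fewer than 2 entries.
def Pre_solution (n : Int) (roads : List (List Int)) (sources : List Int) (destination : Int) : Prop :=
  ∀ r ∈ roads, 2 ≤ r.length
instance (n : Int) (roads : List (List Int)) (sources : List Int) (destination : Int) : Decidable (Pre_solution n roads sources destination) := by unfold Pre_solution; infer_instance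

def pvWitness_solution : Int × List (List Int) × List Int × Int :=
  (5, [[1, 2], [2, 3], [4, 5]], [1, 3, 5], 3)

def Spec_solution (n : Int) (roads : List (List Int)) (sources : List Int) (destination : Int) (out : List Int) : Prop := out = solution_alt n roads sources destination
instance (n : Int) (roads : List (List Int)) (sources : List Int) (destination : Int) (out : List Int) : Decidable (Spec_solution n roads sources destination out) := by unfold Spec_solution; infer_instance

-- ===== CLAIM (what is proved, stated in full; the proofs are below) =====
def Claim_equal_solution : Prop := ∀ (n : Int) (roads : List (List Int)) (sources : List Int) (destination : Int), Dom_solution n roads sources destination → Pre_solution n roads sources destination → Spec_solution n roads sources destination (solution n roads sources destination)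

-- ===== LEMMAS AND PROOFS =====

-- ---- adjacency-dict characterisation ----
theorem buildRoad_eq_modify (d : PySem.Dict Int (List Int)) (k x : Int) :
    buildRoadA d k x = d.modify k [] (· ++ [x]) := by
  unfold buildRoadA PySem.Dict.modify
  cases h : d.get? k with
  | none => rw [PySem.Dict.getD_of_get?_eq_none _ _ h]; rfl
  | some l => rw [PySem.Dict.getD_of_get?_eq_some _ _ h]

-- the relation one road contributes to the adjacency dict
def edgeRel (r : List Int) (u v : Int) : Prop :=
  ∃ a b, PySem.List.pyGet? r 0 = some a ∧ PySem.List.pyGet? r 1 = some b ∧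
    ((a = u ∧ b = v) ∨ (b = u ∧ a = v))

theorem mem_buildRoad_getD (d : PySem.Dict Int (List Int)) (k x u v : Int) :
    v ∈ (buildRoadA d k x).getD u [] ↔ v ∈ d.getD u [] ∨ (u = k ∧ v = x) := by
  rw [buildRoad_eq_modify, PySem.Dict.getD_modify]
  by_cases h : u = k <;> simp [h]

theorem mem_buildA_fold_getD (roads : List (List Int)) (d : PySem.Dict Int (List Int)) (u v : Int) :
    v ∈ (roads.foldl (fun d r =>
      match PySem.List.pyGet? r 0, PySem.List.pyGet? r 1 with
      | some a, some b => buildRoadA (buildRoadA d a b) b a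
      | _, _ => d) d).getD u []
    ↔ v ∈ d.getD u [] ∨ ∃ r ∈ roads, edgeRel r u v := by
  induction roads generalizing d with
  | nil => simp
  | cons r rs ih =>
    simp only [List.foldl_cons]
    cases h0 : PySem.List.pyGet? r 0 with
    | none =>
      rw [ih]
      simp only [List.mem_cons]
      constructor
      · rintro (h | ⟨r', hr', hrel⟩)
        · exact Or.inl h
        · exact Or.inr ⟨r', Or.inr hr', hrel⟩
      · rintro (h | ⟨r', (rfl | hr'), hrel⟩)
        · exact Or.inl h
        · obtain ⟨a, b, ha, _⟩ := hrel; rw [h0] at ha; cases ha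
        · exact Or.inr ⟨r', hr', hrel⟩
    | some a =>
      cases h1 : PySem.List.pyGet? r 1 with
      | none =>
        rw [ih]
        simp only [List.mem_cons]
        constructor
        · rintro (h | ⟨r', hr', hrel⟩)
          · exact Or.inl h
          · exact Or.inr ⟨r', Or.inr hr', hrel⟩
        · rintro (h | ⟨r', (rfl | hr'), hrel⟩)
          · exact Or.inl h
          · obtain ⟨a', b, _, hb, _⟩ := hrel; rw [h1] at hb; cases hb
          · exact Or.inr ⟨r', hr', hrel⟩
      | some b =>
        rw [ih]
        simp only [mem_buildRoad_getD, List.mem_cons]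
        constructor
        · rintro (((h | h) | h) | ⟨r', hr', hrel⟩)
          · exact Or.inl h
          · exact Or.inr ⟨r, Or.inl rfl, a, b, h0, h1, Or.inl ⟨h.1.symm, h.2.symm⟩⟩
          · exact Or.inr ⟨r, Or.inl rfl, a, b, h0, h1, Or.inr ⟨h.1.symm, h.2.symm⟩⟩
          · exact Or.inr ⟨r', Or.inr hr', hrel⟩
        · rintro (h | ⟨r', (rfl | hr'), hrel⟩)
          · exact Or.inl (Or.inl (Or.inl h))
          · obtain ⟨a', b', ha', hb', hd⟩ := hrel
            rw [h0] at ha'; rw [h1] at hb'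
            cases ha'; cases hb'
            rcases hd with ⟨rfl, rfl⟩ | ⟨rfl, rfl⟩
            · exact Or.inl (Or.inl (Or.inr ⟨rfl, rfl⟩))
            · exact Or.inl (Or.inr ⟨rfl, rfl⟩)
          · exact Or.inr ⟨r', hr', hrel⟩

theorem mem_buildA_getD (roads : List (List Int)) (u v : Int) :
    v ∈ (buildA roads).getD u [] ↔ ∃ r ∈ roads, edgeRel r u v := by
  unfold buildA
  rw [mem_buildA_fold_getD]
  simp [PySem.Dict.getD_empty]

-- ---- Bool layer conditions ----
def hitA (adj : PySem.Dict Int (List Int)) (F : List Int) (k : Int) : Bool :=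
  F.any (fun u => (adj.getD u []).contains k)

def adjEB (F : PySem.Set Int) (r : List Int) (k : Int) : Bool :=
  match PySem.List.pyGet? r 0, PySem.List.pyGet? r 1 with
  | some a, some b =>
      (PySem.Set.contains F a && (b == k)) || (PySem.Set.contains F b && (a == k))
  | _, _ => false

def adjB (F : PySem.Set Int) (roads : List (List Int)) (k : Int) : Bool :=
  roads.any (fun r => adjEB F r k)

theorem adjEB_iff (F : PySem.Set Int) (r : List Int) (k : Int) :
    adjEB F r k = true ↔ ∃ a b, PySem.List.pyGet? r 0 = some a ∧ PySem.List.pyGet? r 1 = some b ∧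
      ((a ∈ F ∧ b = k) ∨ (b ∈ F ∧ a = k)) := by
  unfold adjEB
  cases h0 : PySem.List.pyGet? r 0 with
  | none => simp
  | some a =>
    cases h1 : PySem.List.pyGet? r 1 with
    | none => simp
    | some b => simp [PySem.Set.contains]

theorem adjB_iff (F : PySem.Set Int) (roads : List (List Int)) (k : Int) :
    adjB F roads k = true ↔ ∃ r ∈ roads, ∃ a b, PySem.List.pyGet? r 0 = some a ∧
      PySem.List.pyGet? r 1 = some b ∧ ((a ∈ F ∧ b = k) ∨ (b ∈ F ∧ a = k)) := by
  unfold adjB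
  rw [List.any_eq_true]
  exact ⟨fun ⟨r, hr, h⟩ => ⟨r, hr, (adjEB_iff F r k).1 h⟩,
         fun ⟨r, hr, h⟩ => ⟨r, hr, (adjEB_iff F r k).2 h⟩⟩

theorem hitA_iff (adj : PySem.Dict Int (List Int)) (F : List Int) (k : Int) :
    hitA adj F k = true ↔ ∃ u ∈ F, k ∈ adj.getD u [] := by
  unfold hitA
  simp

-- the two layer conditions agree for set-equal frontiers
theorem hitA_eq_adjB (roads : List (List Int)) (FA : List Int) (FB : PySem.Set Int) (k : Int)
    (hmem : ∀ x, x ∈ FA ↔ x ∈ FB) : hitA (buildA roads) FA k = adjB FB roads k := by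
  rw [Bool.eq_iff_iff, hitA_iff, adjB_iff]
  constructor
  · rintro ⟨u, hu, hk⟩
    obtain ⟨r, hr, a, b, ha, hb, hd⟩ := (mem_buildA_getD roads u k).1 hk
    rcases hd with ⟨rfl, rfl⟩ | ⟨rfl, rfl⟩
    · exact ⟨r, hr, a, b, ha, hb, Or.inl ⟨(hmem a).1 hu, rfl⟩⟩
    · exact ⟨r, hr, a, b, ha, hb, Or.inr ⟨(hmem b).1 hu, rfl⟩⟩
  · rintro ⟨r, hr, a, b, ha, hb, hd⟩
    rcases hd with ⟨haF, rfl⟩ | ⟨hbF, rfl⟩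
    · exact ⟨a, (hmem a).2 haF, (mem_buildA_getD roads a b).2 ⟨r, hr, a, b, ha, hb, Or.inl ⟨rfl, rfl⟩⟩⟩
    · exact ⟨b, (hmem b).2 hbF, (mem_buildA_getD roads b a).2 ⟨r, hr, a, b, ha, hb, Or.inr ⟨rfl, rfl⟩⟩⟩

-- ---- A-side layer machinery ----
-- per-neighbour step (proof helper describing A's inner loop)
def stepN (lvl : Int) (st : List Int × PySem.Dict Int Int) (v : Int) :
    List Int × PySem.Dict Int Int :=
  if st.2.contains v then st else (st.1 ++ [v], st.2.insert v lvl)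

def innerAdj (adj : PySem.Dict Int (List Int)) (lvl : Int)
    (st : List Int × PySem.Dict Int Int) (u : Int) : List Int × PySem.Dict Int Int :=
  (adj.getD u []).foldl (stepN lvl) st

theorem innerAdj_eq_foldl_stepN (adj : PySem.Dict Int (List Int)) (lvl : Int)
    (st : List Int × PySem.Dict Int Int) (u : Int) :
    innerAdj adj lvl st u = (adj.getD u []).foldl (stepN lvl) st := rfl

theorem ne_of_some_not_contains (V : PySem.Dict Int Int) {k x : Int} {v : Int}
    (h : V.get? k = some v) (hc : ¬ V.contains x = true) : k ≠ x := by
  intro he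
  rw [he, (PySem.Dict.get?_eq_none_iff_contains _ _).2 (by simpa using hc)] at h
  simp at h

theorem stepN_fold_get?_mono (nbrs : List Int) (lvl : Int) (Y : List Int)
    (V : PySem.Dict Int Int) (k : Int) (v : Int) (h : V.get? k = some v) :
    ((nbrs.foldl (stepN lvl) (Y, V)).2).get? k = some v := by
  induction nbrs generalizing Y V with
  | nil => exact h
  | cons x xs ih =>
    simp only [List.foldl_cons]
    by_cases hc : V.contains x
    · simpa [stepN, hc] using ih Y V h
    · have hx : k ≠ x := ne_of_some_not_contains V h hc
      simp only [stepN, if_neg hc]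
      exact ih _ _ (by rw [PySem.Dict.get?_insert_of_ne _ _ hx]; exact h)

theorem stepN_fold_size (nbrs : List Int) (lvl : Int) (Y : List Int) (V : PySem.Dict Int Int) :
    ((nbrs.foldl (stepN lvl) (Y, V)).2).size + Y.length
      = V.size + ((nbrs.foldl (stepN lvl) (Y, V)).1).length := by
  induction nbrs generalizing Y V with
  | nil => simp
  | cons w ws ih =>
    simp only [List.foldl_cons]
    by_cases hc : V.contains w
    · simpa [stepN, hc] using ih Y V
    · simp only [stepN, if_neg hc]
      have := ih (Y ++ [w]) (V.insert w lvl)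
      rw [PySem.Dict.size_insert, if_neg hc] at this
      simp only [List.length_append, List.length_cons, List.length_nil] at this ⊢
      omega

theorem layer_fold_size (adj : PySem.Dict Int (List Int)) (F : List Int) (lvl : Int)
    (st : List Int × PySem.Dict Int Int) :
    ((F.foldl (innerAdj adj lvl) st).2).size + st.1.length
      = st.2.size + ((F.foldl (innerAdj adj lvl) st).1).length := by
  induction F generalizing st with
  | nil => simp
  | cons u us ih =>
    simp only [List.foldl_cons]
    have h1 := ih (innerAdj adj lvl st u)
    have h2 : (innerAdj adj lvl st u).2.size + st.1.length
        = st.2.size + (innerAdj adj lvl st u).1.length := by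
      rcases st with ⟨Y, V⟩; exact stepN_fold_size _ _ _ _
    omega

theorem stepN_fold_keys_nodup (nbrs : List Int) (lvl : Int) (Y : List Int)
    (V : PySem.Dict Int Int) (h : V.keys.Nodup) :
    ((nbrs.foldl (stepN lvl) (Y, V)).2).keys.Nodup := by
  induction nbrs generalizing Y V with
  | nil => exact h
  | cons w ws ih =>
    simp only [List.foldl_cons]
    by_cases hc : V.contains w
    · simpa [stepN, hc] using ih Y V h
    · simp only [stepN, if_neg hc]
      exact ih _ _ (PySem.Dict.nodup_keys_insert _ _ _ h)

theorem layer_fold_keys_nodup (adj : PySem.Dict Int (List Int)) (F : List Int) (lvl : Int)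
    (st : List Int × PySem.Dict Int Int) (h : st.2.keys.Nodup) :
    ((F.foldl (innerAdj adj lvl) st).2).keys.Nodup := by
  induction F generalizing st with
  | nil => exact h
  | cons u us ih =>
    simp only [List.foldl_cons]
    refine ih _ ?_
    rcases st with ⟨Y, V⟩
    rw [innerAdj_eq_foldl_stepN]
    exact stepN_fold_keys_nodup _ _ _ _ h

-- pointwise characterisation of A's inner loop
theorem stepN_fold_get? (nbrs : List Int) (lvl : Int) (Y : List Int)
    (V : PySem.Dict Int Int) (k : Int) :
    ((nbrs.foldl (stepN lvl) (Y, V)).2).get? k =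
      if V.contains k then V.get? k else if k ∈ nbrs then some lvl else none := by
  induction nbrs generalizing Y V with
  | nil =>
    by_cases h : V.contains k
    · simp [h]
    · simp [h, (PySem.Dict.get?_eq_none_iff_contains _ _).2 (by simpa using h)]
  | cons w ws ih =>
    simp only [List.foldl_cons]
    by_cases hw : V.contains w
    · rw [stepN, if_pos hw, ih]
      by_cases hck : V.contains k
      · simp [hck]
      · have hk : k ≠ w := fun h => hck (h ▸ hw)
        simp [hck, List.mem_cons, hk]
    · have hwf : V.contains w = false := by simpa using hw
      rw [stepN, if_neg hw]
      show ((ws.foldl (stepN lvl) (Y ++ [w], V.insert w lvl)).2).get? k = _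
      rw [ih]
      by_cases hk : k = w
      · subst hk
        simp [hwf]
      · simp [PySem.Dict.contains_insert, PySem.Dict.get?_insert, hk, List.mem_cons]

theorem stepN_fold_mem (nbrs : List Int) (lvl : Int) (Y : List Int)
    (V : PySem.Dict Int Int) (x : Int) :
    x ∈ (nbrs.foldl (stepN lvl) (Y, V)).1 ↔
      x ∈ Y ∨ (V.contains x = false ∧ x ∈ nbrs) := by
  induction nbrs generalizing Y V with
  | nil => simp
  | cons w ws ih =>
    simp only [List.foldl_cons]
    by_cases hw : V.contains w
    · rw [stepN, if_pos hw, ih]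
      constructor
      · rintro (h | ⟨hc, hm⟩)
        · exact Or.inl h
        · exact Or.inr ⟨hc, List.mem_cons_of_mem _ hm⟩
      · rintro (h | ⟨hc, hm⟩)
        · exact Or.inl h
        · rcases List.mem_cons.1 hm with rfl | hm
          · rw [hw] at hc; cases hc
          · exact Or.inr ⟨hc, hm⟩
    · rw [stepN, if_neg hw]
      simp only []
      rw [ih]
      have hwf : V.contains w = false := by simpa using hw
      constructor
      · rintro (h | ⟨hc, hm⟩)
        · rcases List.mem_append.1 h with h | h
          · exact Or.inl h
          · simp only [List.mem_singleton] at h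
            exact Or.inr ⟨h ▸ hwf, h ▸ List.mem_cons_self ..⟩
        · rw [PySem.Dict.contains_insert] at hc
          simp only [Bool.or_eq_false_iff, beq_eq_false_iff_ne] at hc
          exact Or.inr ⟨hc.2, List.mem_cons_of_mem _ hm⟩
      · rintro (h | ⟨hc, hm⟩)
        · exact Or.inl (List.mem_append.2 (Or.inl h))
        · rcases List.mem_cons.1 hm with rfl | hm
          · exact Or.inl (List.mem_append.2 (Or.inr (List.mem_singleton.2 rfl)))
          · by_cases hxw : x = w
            · exact Or.inl (List.mem_append.2 (Or.inr (by simp [hxw])))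
            · refine Or.inr ⟨?_, hm⟩
              rw [PySem.Dict.contains_insert]
              simp [hxw, hc]

theorem stepN_fold_contains (nbrs : List Int) (lvl : Int) (Y : List Int)
    (V : PySem.Dict Int Int) (k : Int) :
    ((nbrs.foldl (stepN lvl) (Y, V)).2).contains k
      = (V.contains k || decide (k ∈ nbrs)) := by
  rw [PySem.Dict.contains_eq_isSome_get?, stepN_fold_get?]
  by_cases h1 : V.contains k
  · simp [h1, ← PySem.Dict.contains_eq_isSome_get?]
  · by_cases h2 : k ∈ nbrs <;> simp [h1, h2]

theorem layerA_get? (adj : PySem.Dict Int (List Int)) (F : List Int) (lvl : Int)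
    (N : List Int) (V : PySem.Dict Int Int) (k : Int) :
    ((F.foldl (innerAdj adj lvl) (N, V)).2).get? k =
      if V.contains k then V.get? k else if hitA adj F k then some lvl else none := by
  induction F generalizing N V with
  | nil =>
    by_cases h : V.contains k
    · simp [h]
    · simp [hitA, h, (PySem.Dict.get?_eq_none_iff_contains _ _).2 (by simpa using h)]
  | cons u us ih =>
    simp only [List.foldl_cons]
    rw [show innerAdj adj lvl (N, V) u
        = (((adj.getD u []).foldl (stepN lvl) (N, V)).1,
           ((adj.getD u []).foldl (stepN lvl) (N, V)).2) from rfl]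
    rw [ih, stepN_fold_get?, stepN_fold_contains]
    have hhit : hitA adj (u :: us) k = (decide (k ∈ adj.getD u []) || hitA adj us k) := by
      simp [hitA]
    rw [hhit]
    by_cases h1 : V.contains k <;> by_cases h2 : k ∈ adj.getD u [] <;>
      by_cases h3 : hitA adj us k <;> simp [h1, h2, h3]

theorem layerA_mem (adj : PySem.Dict Int (List Int)) (F : List Int) (lvl : Int)
    (N : List Int) (V : PySem.Dict Int Int) (x : Int) :
    x ∈ (F.foldl (innerAdj adj lvl) (N, V)).1 ↔
      x ∈ N ∨ (V.contains x = false ∧ hitA adj F x = true) := by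
  induction F generalizing N V with
  | nil => simp [hitA]
  | cons u us ih =>
    simp only [List.foldl_cons]
    rw [show innerAdj adj lvl (N, V) u
        = (((adj.getD u []).foldl (stepN lvl) (N, V)).1,
           ((adj.getD u []).foldl (stepN lvl) (N, V)).2) from rfl]
    rw [ih, stepN_fold_mem, stepN_fold_contains]
    have hhit : hitA adj (u :: us) x = (decide (x ∈ adj.getD u []) || hitA adj us x) := by
      simp [hitA]
    rw [hhit]
    by_cases h1 : V.contains x <;> by_cases h2 : x ∈ adj.getD u [] <;>
      by_cases h3 : hitA adj us x <;> simp [h1, h2, h3]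

-- ---- B-side layer machinery ----
theorem relaxEdge_get? (F : PySem.Set Int) (lvl : Int) (x y : Int)
    (V : PySem.Dict Int Int) (S : PySem.Set Int) (k : Int) :
    ((relaxEdge F lvl x y (V, S)).1).get? k =
      if V.contains k then V.get? k
      else if x ∈ F ∧ y = k then some lvl else none := by
  unfold relaxEdge
  dsimp only
  by_cases hc : (PySem.Set.contains F x && !V.contains y) = true
  · rw [if_pos hc]
    obtain ⟨hfx, hvy⟩ := Bool.and_eq_true_iff.1 hc
    have hxF : x ∈ F := by simpa [PySem.Set.contains] using hfx
    have hvyf : V.contains y = false := by simpa using hvy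
    show (V.insert y lvl).get? k = _
    rw [PySem.Dict.get?_insert]
    by_cases hk : k = y
    · subst hk
      simp [hvyf, hxF]
    · rw [if_neg hk]
      by_cases hck : V.contains k
      · simp [hck]
      · simp [hck, Ne.symm hk, (PySem.Dict.get?_eq_none_iff_contains _ _).2 (by simpa using hck)]
  · rw [if_neg hc]
    show V.get? k = _
    by_cases hck : V.contains k
    · simp [hck]
    · have hckf : V.contains k = false := by simpa using hck
      have hcond : ¬ (x ∈ F ∧ y = k) := by
        rintro ⟨hxF, rfl⟩
        exact hc (by
          rw [Bool.and_eq_true]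
          exact ⟨by simpa [PySem.Set.contains] using hxF, by rw [hckf]; rfl⟩)
      simp [hckf, hcond, (PySem.Dict.get?_eq_none_iff_contains _ _).2 hckf]

theorem relaxEdge_contains (F : PySem.Set Int) (lvl : Int) (x y : Int)
    (V : PySem.Dict Int Int) (S : PySem.Set Int) (k : Int) :
    ((relaxEdge F lvl x y (V, S)).1).contains k
      = (V.contains k || decide (x ∈ F ∧ y = k)) := by
  rw [PySem.Dict.contains_eq_isSome_get?, relaxEdge_get?]
  by_cases h1 : V.contains k
  · simp [h1, ← PySem.Dict.contains_eq_isSome_get?]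
  · by_cases h2 : x ∈ F ∧ y = k <;> simp [h1, h2]

theorem relaxEdge_mem (F : PySem.Set Int) (lvl : Int) (x y : Int)
    (V : PySem.Dict Int Int) (S : PySem.Set Int) (z : Int) :
    z ∈ (relaxEdge F lvl x y (V, S)).2 ↔
      z ∈ S ∨ (x ∈ F ∧ V.contains y = false ∧ z = y) := by
  unfold relaxEdge
  dsimp only
  by_cases hc : (PySem.Set.contains F x && !V.contains y) = true
  · rw [if_pos hc]
    obtain ⟨hfx, hvy⟩ := Bool.and_eq_true_iff.1 hc
    have hxF : x ∈ F := by simpa [PySem.Set.contains] using hfx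
    have hvyf : V.contains y = false := by simpa using hvy
    show z ∈ PySem.Set.add S y ↔ _
    rw [PySem.Set.mem_add]
    simp [hxF, hvyf]
  · rw [if_neg hc]
    show z ∈ S ↔ _
    constructor
    · exact Or.inl
    · rintro (h | ⟨hxF, hvyf, rfl⟩)
      · exact h
      · exact absurd (by
          rw [Bool.and_eq_true]
          exact ⟨by simpa [PySem.Set.contains] using hxF, by rw [hvyf]; rfl⟩) hc

theorem stepEdge_get? (F : PySem.Set Int) (lvl : Int) (V : PySem.Dict Int Int)
    (S : PySem.Set Int) (r : List Int) (k : Int) :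
    ((stepEdge F lvl (V, S) r).1).get? k =
      if V.contains k then V.get? k else if adjEB F r k then some lvl else none := by
  unfold stepEdge adjEB
  cases h0 : PySem.List.pyGet? r 0 with
  | none =>
    by_cases h : V.contains k
    · simp [h]
    · simp [h, (PySem.Dict.get?_eq_none_iff_contains _ _).2 (by simpa using h)]
  | some a =>
    cases h1 : PySem.List.pyGet? r 1 with
    | none =>
      by_cases h : V.contains k
      · simp [h]
      · simp [h, (PySem.Dict.get?_eq_none_iff_contains _ _).2 (by simpa using h)]
    | some b =>
      simp only []
      rw [show relaxEdge F lvl a b (V, S)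
          = ((relaxEdge F lvl a b (V, S)).1, (relaxEdge F lvl a b (V, S)).2) from rfl]
      rw [relaxEdge_get?, relaxEdge_contains, relaxEdge_get?]
      by_cases h1' : V.contains k
      · simp [h1']
      · by_cases h2 : a ∈ F <;> by_cases h3 : b ∈ F <;>
          by_cases h4 : b = k <;> by_cases h5 : a = k <;>
          simp [h1', h2, h3, h4, h5, PySem.Set.contains]

theorem stepEdge_contains (F : PySem.Set Int) (lvl : Int) (V : PySem.Dict Int Int)
    (S : PySem.Set Int) (r : List Int) (k : Int) :
    ((stepEdge F lvl (V, S) r).1).contains k = (V.contains k || adjEB F r k) := by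
  rw [PySem.Dict.contains_eq_isSome_get?, stepEdge_get?]
  by_cases h1 : V.contains k
  · simp [h1, ← PySem.Dict.contains_eq_isSome_get?]
  · by_cases h2 : adjEB F r k <;> simp [h1, h2]

theorem stepEdge_mem (F : PySem.Set Int) (lvl : Int) (V : PySem.Dict Int Int)
    (S : PySem.Set Int) (r : List Int) (z : Int) :
    z ∈ (stepEdge F lvl (V, S) r).2 ↔
      z ∈ S ∨ (V.contains z = false ∧ adjEB F r z = true) := by
  unfold stepEdge adjEB
  cases h0 : PySem.List.pyGet? r 0 with
  | none => simp
  | some a =>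
    cases h1 : PySem.List.pyGet? r 1 with
    | none => simp
    | some b =>
      simp only []
      rw [show relaxEdge F lvl a b (V, S)
          = ((relaxEdge F lvl a b (V, S)).1, (relaxEdge F lvl a b (V, S)).2) from rfl]
      rw [relaxEdge_mem, relaxEdge_mem, relaxEdge_contains]
      constructor
      · rintro ((h | ⟨hfa, hvb, rfl⟩) | ⟨hfb, hva, rfl⟩)
        · exact Or.inl h
        · exact Or.inr ⟨hvb, by simp [PySem.Set.contains, hfa]⟩
        · simp only [Bool.or_eq_false_iff, decide_eq_false_iff_not] at hva
          exact Or.inr ⟨hva.1, by simp [PySem.Set.contains, hfb]⟩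
      · rintro (h | ⟨hvz, hadj⟩)
        · exact Or.inl (Or.inl h)
        · simp only [Bool.or_eq_true, Bool.and_eq_true, beq_iff_eq, PySem.Set.contains,
            List.contains_iff_mem] at hadj
          rcases hadj with ⟨hfa, rfl⟩ | ⟨hfb, rfl⟩
          · exact Or.inl (Or.inr ⟨hfa, hvz, rfl⟩)
          · by_cases hfire : a ∈ F ∧ V.contains b = false ∧ b = a
            · exact Or.inl (Or.inr ⟨hfire.1, hfire.2.1, hfire.2.2.symm⟩)
            · refine Or.inr ⟨hfb, ?_, rfl⟩
              have h2' : ¬ (a ∈ F ∧ b = a) := fun hh =>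
                hfire ⟨hh.1, hh.2 ▸ hvz, hh.2⟩
              simp [hvz, h2']

theorem layerB_get? (roads : List (List Int)) (F : PySem.Set Int) (lvl : Int)
    (V : PySem.Dict Int Int) (S : PySem.Set Int) (k : Int) :
    ((roads.foldl (stepEdge F lvl) (V, S)).1).get? k =
      if V.contains k then V.get? k else if adjB F roads k then some lvl else none := by
  induction roads generalizing V S with
  | nil =>
    by_cases h : V.contains k
    · simp [h]
    · simp [adjB, h, (PySem.Dict.get?_eq_none_iff_contains _ _).2 (by simpa using h)]
  | cons r rs ih =>
    simp only [List.foldl_cons]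
    rw [show stepEdge F lvl (V, S) r
        = ((stepEdge F lvl (V, S) r).1, (stepEdge F lvl (V, S) r).2) from rfl]
    rw [ih, stepEdge_get?, stepEdge_contains]
    have hadj : adjB F (r :: rs) k = (adjEB F r k || adjB F rs k) := by simp [adjB]
    rw [hadj]
    by_cases h1 : V.contains k <;> by_cases h2 : adjEB F r k <;>
      by_cases h3 : adjB F rs k <;> simp [h1, h2, h3]

theorem layerB_contains (roads : List (List Int)) (F : PySem.Set Int) (lvl : Int)
    (V : PySem.Dict Int Int) (S : PySem.Set Int) (k : Int) :
    ((roads.foldl (stepEdge F lvl) (V, S)).1).contains k = (V.contains k || adjB F roads k) := by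
  rw [PySem.Dict.contains_eq_isSome_get?, layerB_get?]
  by_cases h1 : V.contains k
  · simp [h1, ← PySem.Dict.contains_eq_isSome_get?]
  · by_cases h2 : adjB F roads k <;> simp [h1, h2]

theorem layerB_mem (roads : List (List Int)) (F : PySem.Set Int) (lvl : Int)
    (V : PySem.Dict Int Int) (S : PySem.Set Int) (z : Int) :
    z ∈ (roads.foldl (stepEdge F lvl) (V, S)).2 ↔
      z ∈ S ∨ (V.contains z = false ∧ adjB F roads z = true) := by
  induction roads generalizing V S with
  | nil => simp [adjB]
  | cons r rs ih =>
    simp only [List.foldl_cons]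
    rw [show stepEdge F lvl (V, S) r
        = ((stepEdge F lvl (V, S) r).1, (stepEdge F lvl (V, S) r).2) from rfl]
    rw [ih, stepEdge_mem, stepEdge_contains]
    have hadj : adjB F (r :: rs) z = (adjEB F r z || adjB F rs z) := by simp [adjB]
    rw [hadj]
    by_cases h1 : V.contains z <;> by_cases h2 : adjEB F r z <;>
      by_cases h3 : adjB F rs z <;> simp [h1, h2, h3]

theorem relaxEdge_nodup (F : PySem.Set Int) (lvl : Int) (x y : Int)
    (st : PySem.Dict Int Int × PySem.Set Int) (h : st.1.keys.Nodup) :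
    ((relaxEdge F lvl x y st).1).keys.Nodup := by
  unfold relaxEdge
  split_ifs with hc
  · exact PySem.Dict.nodup_keys_insert _ _ _ h
  · exact h

theorem stepEdge_nodup (F : PySem.Set Int) (lvl : Int)
    (st : PySem.Dict Int Int × PySem.Set Int) (r : List Int) (h : st.1.keys.Nodup) :
    ((stepEdge F lvl st r).1).keys.Nodup := by
  unfold stepEdge
  cases PySem.List.pyGet? r 0 with
  | none => exact h
  | some a =>
    cases PySem.List.pyGet? r 1 with
    | none => exact h
    | some b => exact relaxEdge_nodup _ _ _ _ _ (relaxEdge_nodup _ _ _ _ _ h)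

theorem layerB_nodup (roads : List (List Int)) (F : PySem.Set Int) (lvl : Int)
    (st : PySem.Dict Int Int × PySem.Set Int) (h : st.1.keys.Nodup) :
    ((roads.foldl (stepEdge F lvl) st).1).keys.Nodup := by
  induction roads generalizing st with
  | nil => exact h
  | cons r rs ih =>
    simp only [List.foldl_cons]
    exact ih _ (stepEdge_nodup _ _ _ _ h)

-- ---- the while loops ----
theorem bfsA_nil (adj : PySem.Dict Int (List Int)) (fuel : Nat) (V : PySem.Dict Int Int) :
    bfsA adj fuel [] V = V := by
  cases fuel <;> simp [bfsA]

theorem bfsB_nil (roads : List (List Int)) (fuel : Nat) (lvl : Int) (V : PySem.Dict Int Int) :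
    bfsB roads fuel [] lvl V = V := by
  cases fuel <;> simp [bfsB]

-- A's neighbour fold is the stepN fold with the already-queued tail in front
theorem innerA_eq_stepN (nbrs : List Int) (c lvl : Int) (X Y : List Int)
    (V : PySem.Dict Int Int) (hc : V.get? c = some lvl) :
    nbrs.foldl (innerA c) (X ++ Y, V)
      = (X ++ (nbrs.foldl (stepN (lvl + 1)) (Y, V)).1,
         (nbrs.foldl (stepN (lvl + 1)) (Y, V)).2) := by
  induction nbrs generalizing Y V with
  | nil => rfl
  | cons w ws ih =>
    simp only [List.foldl_cons]
    by_cases hw : V.contains w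
    · simpa [innerA, stepN, hw] using ih Y V hc
    · have hwc : c ≠ w := ne_of_some_not_contains V hc hw
      simp only [innerA, stepN, if_neg hw]
      rw [PySem.Dict.getD_of_get?_eq_some _ _ hc, List.append_assoc]
      exact ih (Y ++ [w]) (V.insert w (lvl + 1))
        (by rw [PySem.Dict.get?_insert_of_ne _ _ hwc]; exact hc)

-- A consumes one whole layer, node by node, producing exactly the layer fold
theorem bfsA_layer (adj : PySem.Dict Int (List Int)) (lvl : Int) (F N : List Int)
    (V : PySem.Dict Int Int) (rest : Nat)
    (hF : ∀ x ∈ F, V.get? x = some lvl) :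
    bfsA adj (F.length + rest) (F ++ N) V
      = bfsA adj rest (F.foldl (innerAdj adj (lvl + 1)) (N, V)).1
          (F.foldl (innerAdj adj (lvl + 1)) (N, V)).2 := by
  induction F generalizing N V with
  | nil => simp
  | cons c F' ih =>
    have hc : V.get? c = some lvl := hF c (List.mem_cons_self ..)
    simp only [List.length_cons, List.cons_append, List.foldl_cons]
    rw [show F'.length + 1 + rest = (F'.length + rest) + 1 by omega]
    show bfsA adj ((F'.length + rest) + 1) (c :: (F' ++ N)) V = _
    rw [innerAdj_eq_foldl_stepN]
    cases hadj : adj.get? c with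
    | none =>
      have : adj.getD c [] = [] := PySem.Dict.getD_of_get?_eq_none _ _ hadj
      rw [bfsA, hadj, this]
      exact ih N V (fun x hx => hF x (List.mem_cons_of_mem _ hx))
    | some nbrs =>
      have : adj.getD c [] = nbrs := PySem.Dict.getD_of_get?_eq_some _ _ hadj
      rw [bfsA, hadj, this]
      have he := innerA_eq_stepN nbrs c lvl F' N V hc
      simp only [he]
      exact ih _ _ (fun x hx => stepN_fold_get?_mono _ _ _ _ _ _ (hF x (List.mem_cons_of_mem _ hx)))

-- ---- main simulation: adjacency-dict BFS = layered edge relaxation, pointwise ----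
theorem bfs_eq (roads : List (List Int)) (WA WB : List Int)
    (hWA : ∀ u : Int, ∀ v ∈ (buildA roads).getD u [], v ∈ WA)
    (hWB : ∀ (F : PySem.Set Int) (k : Int), adjB F roads k = true → k ∈ WB) :
    ∀ (fuelA fuelB : Nat) (FA : List Int) (FB : PySem.Set Int) (lvl : Int)
      (VA VB : PySem.Dict Int Int),
      (∀ k, VA.get? k = VB.get? k) →
      (∀ x, x ∈ FA ↔ x ∈ FB) →
      (∀ x ∈ FA, VA.get? x = some lvl) →
      VA.keys.Nodup → VB.keys.Nodup →
      (∀ k ∈ VA.keys, k ∈ WA) → (∀ k ∈ VB.keys, k ∈ WB) →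
      FA.length + (WA.length + 1) ≤ fuelA + VA.size →
      (FB ≠ [] → WB.length + 2 ≤ fuelB + VB.size) →
      ∀ k, (bfsA (buildA roads) fuelA FA VA).get? k = (bfsB roads fuelB FB lvl VB).get? k := by
  intro fuelA
  induction fuelA using Nat.strong_induction_on with
  | _ fuelA ih =>
    intro fuelB FA FB lvl VA VB hpt hmem hlvl hndA hndB hsubA hsubB hfA hfB k
    match hFA : FA with
    | [] =>
      have hFBnil : FB = [] := by
        rw [List.eq_nil_iff_forall_not_mem]
        intro x hx
        exact (List.not_mem_nil (a := x)) ((hmem x).2 hx)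
      rw [hFBnil, bfsA_nil, bfsB_nil]
      exact hpt k
    | f :: FA' =>
      -- both loops take one full layer
      have hcontains_eq : ∀ j, VA.contains j = VB.contains j := by
        intro j
        rw [PySem.Dict.contains_eq_isSome_get?, PySem.Dict.contains_eq_isSome_get?, hpt j]
      have hsizeA : VA.size ≤ WA.length := by
        simpa [PySem.Dict.size, PySem.Dict.keys] using
          (hndA.subperm (fun _ h => hsubA _ h)).length_le
      have hsizeB : VB.size ≤ WB.length := by
        simpa [PySem.Dict.size, PySem.Dict.keys] using
          (hndB.subperm (fun _ h => hsubB _ h)).length_le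
      have hFBne : FB ≠ [] := by
        intro hfb
        exact (List.not_mem_nil (a := f)) (hfb ▸ (hmem f).1 (List.mem_cons_self ..))
      have hfuelB2 : 2 ≤ fuelB := by
        have := hfB hFBne; omega
      obtain ⟨fB', rfl⟩ : ∃ fB', fuelB = fB' + 1 := ⟨fuelB - 1, by omega⟩
      obtain ⟨f0, F0, rfl⟩ : ∃ f0 F0, FB = f0 :: F0 := by
        cases FB with
        | nil => exact absurd rfl hFBne
        | cons f0 F0 => exact ⟨f0, F0, rfl⟩
      have hlenA : (f :: FA').length ≤ fuelA := by
        have := hfA; simp only [List.length_cons] at this ⊢; omega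
      obtain ⟨rest, hrest⟩ : ∃ rest, fuelA = (f :: FA').length + rest :=
        ⟨fuelA - (f :: FA').length, by omega⟩
      set adj := buildA roads with hadjdef
      set sA := (f :: FA').foldl (innerAdj adj (lvl + 1)) ([], VA) with hsA
      set sB := roads.foldl (stepEdge (f0 :: F0) (lvl + 1)) (VB, PySem.Set.empty) with hsB
      have hA : bfsA adj fuelA (f :: FA') VA = bfsA adj rest sA.1 sA.2 := by
        rw [hrest]
        have := bfsA_layer adj lvl (f :: FA') [] VA rest hlvl
        simpa using this
      have hB : bfsB roads (fB' + 1) (f0 :: F0) lvl VB = bfsB roads fB' sB.2 (lvl + 1) sB.1 := rfl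
      rw [hA, hB]
      have hadjB_eq : ∀ j, hitA adj (f :: FA') j = adjB (f0 :: F0) roads j :=
        fun j => hitA_eq_adjB roads _ _ j hmem
      have hsA2 : ∀ j, sA.2.get? j =
          (if VA.contains j then VA.get? j else if hitA adj (f :: FA') j then some (lvl+1) else none) :=
        fun j => layerA_get? adj _ _ _ _ j
      have hsB1 : ∀ j, sB.1.get? j =
          (if VB.contains j then VB.get? j else if adjB (f0 :: F0) roads j then some (lvl+1) else none) :=
        fun j => layerB_get? roads _ _ _ _ j
      have hpt' : ∀ j, sA.2.get? j = sB.1.get? j := by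
        intro j
        rw [hsA2 j, hsB1 j, hcontains_eq j, hadjB_eq j, hpt j]
      have hmemA : ∀ x, x ∈ sA.1 ↔ (VA.contains x = false ∧ hitA adj (f :: FA') x = true) := by
        intro x
        rw [hsA]
        rw [layerA_mem]
        simp
      have hmemB : ∀ x, x ∈ sB.2 ↔ (VB.contains x = false ∧ adjB (f0 :: F0) roads x = true) := by
        intro x
        rw [hsB, layerB_mem]
        simp [PySem.Set.empty]
      have hmem' : ∀ x, x ∈ sA.1 ↔ x ∈ sB.2 := by
        intro x
        rw [hmemA x, hmemB x, hcontains_eq x, hadjB_eq x]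
      have hlvl' : ∀ x ∈ sA.1, sA.2.get? x = some (lvl + 1) := by
        intro x hx
        obtain ⟨hcx, hhx⟩ := (hmemA x).1 hx
        rw [hsA2 x, hcx, hhx]
        simp
      have hndA' : sA.2.keys.Nodup := layer_fold_keys_nodup adj _ _ _ hndA
      have hndB' : sB.1.keys.Nodup := layerB_nodup roads _ _ _ hndB
      have hsubA' : ∀ j ∈ sA.2.keys, j ∈ WA := by
        intro j hj
        have hcj : sA.2.contains j = true := (PySem.Dict.contains_iff_mem_keys _ _).2 hj
        rw [PySem.Dict.contains_eq_isSome_get?, hsA2 j] at hcj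
        by_cases h1 : VA.contains j
        · exact hsubA j ((PySem.Dict.contains_iff_mem_keys _ _).1 h1)
        · by_cases h2 : hitA adj (f :: FA') j
          · obtain ⟨u, _, hu⟩ := (hitA_iff adj _ j).1 h2
            exact hWA u j hu
          · rw [if_neg h1, if_neg h2] at hcj; simp at hcj
      have hsubB' : ∀ j ∈ sB.1.keys, j ∈ WB := by
        intro j hj
        have hcj : sB.1.contains j = true := (PySem.Dict.contains_iff_mem_keys _ _).2 hj
        rw [hsB, layerB_contains] at hcj
        have hcj' : VB.contains j = true ∨ adjB (f0 :: F0) roads j = true := by simpa using hcj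
        rcases hcj' with h | h
        · exact hsubB j ((PySem.Dict.contains_iff_mem_keys _ _).1 h)
        · exact hWB _ j h
      have hszA : sA.2.size = VA.size + sA.1.length := by
        have := layer_fold_size adj (f :: FA') (lvl + 1) ([], VA)
        simp only [← hsA, List.length_nil] at this
        omega
      have hfA' : sA.1.length + (WA.length + 1) ≤ rest + sA.2.size := by
        simp only [List.length_cons] at hfA hrest
        omega
      have hfB' : sB.2 ≠ [] → WB.length + 2 ≤ fB' + sB.1.size := by
        intro hne
        obtain ⟨x, hx⟩ := List.exists_mem_of_ne_nil _ hne
        obtain ⟨hcx, hax⟩ := (hmemB x).1 hx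
        have hxnew : x ∉ VB.keys := fun hmm =>
          by rw [(PySem.Dict.contains_iff_mem_keys _ _).2 hmm] at hcx; cases hcx
        have hxin : x ∈ sB.1.keys := by
          apply (PySem.Dict.contains_iff_mem_keys _ _).1
          rw [hsB, layerB_contains, hax]
          simp
        have hmono : ∀ j ∈ VB.keys, j ∈ sB.1.keys := by
          intro j hj
          apply (PySem.Dict.contains_iff_mem_keys _ _).1
          rw [hsB, layerB_contains, (PySem.Dict.contains_iff_mem_keys _ _).2 hj]
          simp
        have hsub2 : (x :: VB.keys) ⊆ sB.1.keys := by
          intro j hj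
          rcases List.mem_cons.1 hj with rfl | hj
          · exact hxin
          · exact hmono j hj
        have hnd2 : (x :: VB.keys).Nodup := List.nodup_cons.2 ⟨hxnew, hndB⟩
        have := (hnd2.subperm hsub2).length_le
        simp only [List.length_cons] at this
        have hsz : VB.size + 1 ≤ sB.1.size := by
          simpa [PySem.Dict.size, PySem.Dict.keys] using this
        have := hfB hFBne
        omega
      have hrest_lt : rest < fuelA := by
        simp only [List.length_cons] at hrest; omega
      exact ih rest hrest_lt fB' sA.1 sB.2 (lvl + 1) sA.2 sB.1
        hpt' hmem' hlvl' hndA' hndB' hsubA' hsubB' hfA' hfB' k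

-- ---- final answer loops ----
theorem answer_eq (visited : PySem.Dict Int Int) (sources acc : List Int) :
    sources.foldl (fun answer s =>
      match visited.get? s with
      | some v => answer ++ [v]
      | none   => answer ++ [-1]) acc
      = acc ++ sources.map (fun s => visited.getD s (-1)) := by
  induction sources generalizing acc with
  | nil => simp
  | cons s ss ih =>
    simp only [List.foldl_cons, List.map_cons]
    cases h : visited.get? s with
    | none => rw [ih, PySem.Dict.getD_of_get?_eq_none _ _ h]; simp
    | some v => rw [ih, PySem.Dict.getD_of_get?_eq_some _ _ h]; simp

-- every adjacency-list member is in destination :: adj.values.flatten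
theorem mem_getD_mem_W (adj : PySem.Dict Int (List Int)) (dest u v : Int)
    (h : v ∈ adj.getD u []) : v ∈ dest :: adj.values.flatten := by
  cases hg : adj.get? u with
  | none => rw [PySem.Dict.getD_of_get?_eq_none _ _ hg] at h; simp at h
  | some l =>
    rw [PySem.Dict.getD_of_get?_eq_some _ _ hg] at h
    refine List.mem_cons_of_mem _ (List.mem_flatten.2 ⟨l, ?_, h⟩)
    have := PySem.Dict.mem_items_of_get?_eq_some _ hg
    simpa [PySem.Dict.values, List.mem_map] using ⟨u, this⟩

-- road endpoints live in the first two entries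
theorem pyGet_zero_mem_take2 (r : List Int) (a : Int) (h : PySem.List.pyGet? r 0 = some a) :
    a ∈ r.take 2 := by
  cases r with
  | nil => simp [PySem.List.pyGet?, PySem.List.pyIdx?] at h
  | cons x xs =>
    simp [PySem.List.pyGet?, PySem.List.pyIdx?] at h
    simp [h]

theorem pyGet_one_mem_take2 (r : List Int) (b : Int) (h : PySem.List.pyGet? r 1 = some b) :
    b ∈ r.take 2 := by
  cases r with
  | nil => simp [PySem.List.pyGet?, PySem.List.pyIdx?] at h
  | cons x xs =>
    cases xs with
    | nil => simp [PySem.List.pyGet?, PySem.List.pyIdx?] at h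
    | cons y ys =>
      simp [PySem.List.pyGet?, PySem.List.pyIdx?] at h
      simp [h]

theorem length_flatMap_take2 (roads : List (List Int)) :
    (roads.flatMap (fun r => r.take 2)).length ≤ 2 * roads.length := by
  induction roads with
  | nil => simp
  | cons r rs ih =>
    simp only [List.flatMap_cons, List.length_append, List.length_cons]
    have : (r.take 2).length ≤ 2 := by
      simp
    omega

-- ===== VERDICT (by name: the statement is the Claim_ definition above) =====
theorem solution_spec : Claim_equal_solution := by
  intro n roads sources destination _ _
  simp only [Spec_solution, solution, solution_alt]
  set adj := buildA roads with hadj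
  set WA : List Int := destination :: adj.values.flatten with hWA
  set WB : List Int := destination :: roads.flatMap (fun r => r.take 2) with hWB
  have hpt : ∀ k, (bfsA adj (adj.values.flatten.length + 2) [destination]
        (PySem.Dict.empty.insert destination 0)).get? k
      = (bfsB roads (2 * roads.length + 2) [destination] 0
        (PySem.Dict.empty.insert destination 0)).get? k := by
    apply bfs_eq roads WA WB
    · intro u v hv; exact mem_getD_mem_W adj destination u v hv
    · intro F j h
      obtain ⟨r, hr, a, b, ha, hb, hd⟩ := (adjB_iff F roads j).1 h
      rcases hd with ⟨_, rfl⟩ | ⟨_, rfl⟩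
      · exact List.mem_cons_of_mem _ (List.mem_flatMap.2 ⟨r, hr, pyGet_one_mem_take2 r b hb⟩)
      · exact List.mem_cons_of_mem _ (List.mem_flatMap.2 ⟨r, hr, pyGet_zero_mem_take2 r a ha⟩)
    · intro k; rfl
    · intro x; exact Iff.rfl
    · intro x hx
      simp only [List.mem_singleton] at hx
      rw [hx]; exact PySem.Dict.get?_insert_self _ _ _
    · exact PySem.Dict.nodup_keys_insert _ _ _ PySem.Dict.nodup_keys_empty
    · exact PySem.Dict.nodup_keys_insert _ _ _ PySem.Dict.nodup_keys_empty
    · intro j hj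
      rcases (PySem.Dict.mem_keys_insert _ _ _ _).1 hj with h | h
      · rw [hWA, h]; exact List.mem_cons_self ..
      · rw [PySem.Dict.keys_empty] at h; cases h
    · intro j hj
      rcases (PySem.Dict.mem_keys_insert _ _ _ _).1 hj with h | h
      · rw [hWB, h]; exact List.mem_cons_self ..
      · rw [PySem.Dict.keys_empty] at h; cases h
    · have hs : (PySem.Dict.empty.insert destination (0 : Int)).size = 1 := by
        rw [PySem.Dict.size_insert]
        simp [PySem.Dict.contains_empty, PySem.Dict.size_empty]
      rw [hs, hWA]
      simp only [List.length_cons]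
      simp
      omega
    · intro _
      have hs : (PySem.Dict.empty.insert destination (0 : Int)).size = 1 := by
        rw [PySem.Dict.size_insert]
        simp [PySem.Dict.contains_empty, PySem.Dict.size_empty]
      rw [hs, hWB]
      have := length_flatMap_take2 roads
      simp only [List.length_cons]
      omega
  rw [answer_eq]
  simp only [List.nil_append]
  apply List.map_congr_left
  intro s _
  rw [PySem.Dict.getD_eq_get?_getD, PySem.Dict.getD_eq_get?_getD, hpt s]
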